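-- pv_equiv track=rewrite | github.com/WilliamLu1999/data-mining | Frequent-Items/task1.py | export_output
-- ===== SOURCE A (Python) =====
-- def export_output(data):
--     temp = ''
--     temp_len = 1
--     for d in data:
--         if len(d) == 1:
--             temp += f'{str(d).split(",")[0]}),'
--         elif len(d) == temp_len:
--             temp += f'{d},'
--         else:
--             temp = temp[:-1]
--             temp += f'\n\n{d},'
--             temp_len = len(d)
--
--     return temp.rstrip(",")
-- ===== SOURCE B (Python) =====
-- def export_output(data):
--     # One pass that partitions data into consecutive runs instead of A's
--     # append-then-delete comma surgery; runs are joined at the end.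
--     runs = []            # list of (needs_blank_line, [formatted items])
--     temp_len = 1
--     for d in data:
--         if len(d) == 1:
--             item = str(d).split(',')[0] + ')'
--         else:
--             item = str(d)
--         if len(d) != 1 and len(d) != temp_len:
--             runs.append((True, [item]))
--             temp_len = len(d)
--         elif runs:
--             runs[-1][1].append(item)
--         else:
--             runs.append((False, [item]))
--     return ''.join(('\n\n' if sep else '') + ','.join(items) for sep, items in runs)
-- ===== Notes on version B (the rewrite author's own statement) =====
-- stated objective: simpler
-- what changed: B makes one pass that partitions the itemsets into consecutive runs (a new run starts exactly when len(d) != 1 and len(d) != temp_len) and then joins each run with ',' and prefixes '\n\n' before runs opened at a boundary, eliminating A's append-then-delete trailing-comma surgery (temp[:-1]) and the final rstrip entirely.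
import Mathlib
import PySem

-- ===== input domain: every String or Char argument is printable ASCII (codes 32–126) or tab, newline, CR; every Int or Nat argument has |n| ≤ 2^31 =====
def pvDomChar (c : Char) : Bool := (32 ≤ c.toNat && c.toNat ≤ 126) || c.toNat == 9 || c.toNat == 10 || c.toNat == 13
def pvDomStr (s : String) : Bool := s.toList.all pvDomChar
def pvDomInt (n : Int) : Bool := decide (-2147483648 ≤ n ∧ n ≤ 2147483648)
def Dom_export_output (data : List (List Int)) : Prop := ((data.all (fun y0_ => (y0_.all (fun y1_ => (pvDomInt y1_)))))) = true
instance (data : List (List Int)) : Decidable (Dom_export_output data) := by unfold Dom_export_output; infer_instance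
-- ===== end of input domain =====

-- B replaces A's append-then-delete comma surgery by a single pass that groups the
-- itemsets into consecutive runs and joins them at the end (objective: simpler flow, same cost).

-- ===== PORT A =====
-- str(d) for a Python tuple of ints: "()", "(5,)", "(1, 2)" — exact
def pyTupleRepr : List Int → List Char
  | [] => ['(', ')']
  | [x] => '(' :: (PySem.Int.toChars x ++ [',', ')'])
  | x :: y :: xs => '(' :: (PySem.Chars.join [',', ' '] ((x :: y :: xs).map PySem.Int.toChars) ++ [')'])

def stepA (st : List Char × Int) (d : List Int) : List Char × Int :=
  if PySem.List.len d = 1 then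
    -- temp += f'{str(d).split(",")[0]}),'
    (st.1 ++ (PySem.List.pyGetD (PySem.Chars.splitOn (pyTupleRepr d) [',']) 0 [] ++ [')', ',']), st.2)
  else if PySem.List.len d = st.2 then
    -- temp += f'{d},'
    (st.1 ++ (pyTupleRepr d ++ [',']), st.2)
  else
    -- temp = temp[:-1]; temp += f'\n\n{d},'; temp_len = len(d)
    (PySem.List.slice st.1 none (some (-1)) ++ ('\n' :: '\n' :: (pyTupleRepr d ++ [','])), PySem.List.len d)

def export_output (data : List (List Int)) : String :=
  let st := data.foldl stepA ([], 1)
  -- temp.rstrip(","): drop every trailing ',' (ported by hand, exact)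
  String.ofList ((st.1.reverse.dropWhile (fun c => c == ',')).reverse)

-- ===== PORT B =====
-- item = str(d).split(',')[0] + ')' if len(d)==1 else str(d)
def fmtItem (d : List Int) : List Char :=
  if PySem.List.len d = 1 then
    PySem.List.pyGetD (PySem.Chars.splitOn (pyTupleRepr d) [',']) 0 [] ++ [')']
  else pyTupleRepr d

-- runs[-1][1].append(it)
def appendLastRun : List (Bool × List (List Char)) → List Char → List (Bool × List (List Char))
  | [], _ => []
  | [(b, items)], it => [(b, items ++ [it])]
  | r :: r' :: rs, it => r :: appendLastRun (r' :: rs) it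

def stepB (st : List (Bool × List (List Char)) × Int) (d : List Int) :
    List (Bool × List (List Char)) × Int :=
  let it := fmtItem d
  if PySem.List.len d ≠ 1 ∧ PySem.List.len d ≠ st.2 then
    (st.1 ++ [(true, [it])], PySem.List.len d)
  else if st.1 ≠ [] then
    (appendLastRun st.1 it, st.2)
  else
    (st.1 ++ [(false, [it])], st.2)

-- ('\n\n' if sep else '') + ','.join(items)
def renderRun (r : Bool × List (List Char)) : List Char :=
  (if r.1 then ['\n', '\n'] else []) ++ PySem.Chars.join [','] r.2

def export_output_alt (data : List (List Int)) : String :=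
  let st := data.foldl stepB ([], 1)
  String.ofList (PySem.Chars.join [] (st.1.map renderRun))

-- ===== PRECONDITION & SPEC =====
def Spec_export_output (data : List (List Int)) (out : String) : Prop := out = export_output_alt data
instance (data : List (List Int)) (out : String) : Decidable (Spec_export_output data out) := by unfold Spec_export_output; infer_instance

-- ===== CLAIM (what is proved, stated in full; the proofs are below) =====
def Claim_equal_export_output : Prop := ∀ (data : List (List Int)), Dom_export_output data → Spec_export_output data (export_output data)

-- ===== LEMMAS AND PROOFS =====

def renderAll (runs : List (Bool × List (List Char))) : List Char :=
  PySem.Chars.join [] (runs.map renderRun)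

def Good (runs : List (Bool × List (List Char))) : Prop := ∀ r ∈ runs, r.2 ≠ []

def RelAB (temp : List Char) (runs : List (Bool × List (List Char))) : Prop :=
  (runs = [] ∧ temp = []) ∨
  (runs ≠ [] ∧ temp = renderAll runs ++ [','] ∧ (renderAll runs).getLast? ≠ some ',')

lemma join_nil_sep (ps : List (List Char)) : PySem.Chars.join [] ps = ps.flatten := by
  induction ps with
  | nil => simp [PySem.Chars.join_nil]
  | cons p ps ih =>
    cases ps with
    | nil => simp [PySem.Chars.join_singleton]
    | cons q rest => simp [PySem.Chars.join_cons_cons, ih]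

lemma join_comma_concat (ps : List (List Char)) (it : List Char) (h : ps ≠ []) :
    PySem.Chars.join [','] (ps ++ [it]) = PySem.Chars.join [','] ps ++ ',' :: it := by
  induction ps with
  | nil => exact absurd rfl h
  | cons p ps ih =>
    cases ps with
    | nil => simp [PySem.Chars.join_cons_cons, PySem.Chars.join_singleton]
    | cons q rest =>
      have hthis := ih (by simp)
      rw [List.cons_append] at hthis
      simp only [List.cons_append, PySem.Chars.join_cons_cons, hthis]
      simp

lemma renderAll_append (runs : List (Bool × List (List Char))) (r : Bool × List (List Char)) :
    renderAll (runs ++ [r]) = renderAll runs ++ renderRun r := by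
  simp [renderAll, join_nil_sep]

lemma renderAll_cons (r : Bool × List (List Char)) (runs : List (Bool × List (List Char))) :
    renderAll (r :: runs) = renderRun r ++ renderAll runs := by
  simp [renderAll, join_nil_sep]

lemma pyTupleRepr_last (d : List Int) : (pyTupleRepr d).getLast? = some ')' := by
  match d with
  | [] => rfl
  | [x] =>
    show ('(' :: (PySem.Int.toChars x ++ [',', ')'])).getLast? = some ')'
    have : '(' :: (PySem.Int.toChars x ++ [',', ')']) =
        ('(' :: PySem.Int.toChars x ++ [',']) ++ [')'] := by simp
    rw [this, List.getLast?_concat]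
  | x :: y :: xs =>
    show ('(' :: (PySem.Chars.join [',', ' '] ((x :: y :: xs).map PySem.Int.toChars) ++ [')'])).getLast? = some ')'
    have : '(' :: (PySem.Chars.join [',', ' '] ((x :: y :: xs).map PySem.Int.toChars) ++ [')']) =
        ('(' :: PySem.Chars.join [',', ' '] ((x :: y :: xs).map PySem.Int.toChars)) ++ [')'] := by simp
    rw [this, List.getLast?_concat]

lemma fmtItem_last (d : List Int) : (fmtItem d).getLast? = some ')' := by
  unfold fmtItem
  split
  · exact List.getLast?_concat
  · exact pyTupleRepr_last d

lemma fmtItem_ne_nil (d : List Int) : fmtItem d ≠ [] := by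
  intro h
  have := fmtItem_last d
  rw [h] at this
  simp at this

lemma appendLastRun_good (runs : List (Bool × List (List Char))) (it : List Char)
    (hg : Good runs) : Good (appendLastRun runs it) := by
  induction runs with
  | nil => simpa [appendLastRun] using hg
  | cons r rs ih =>
    cases rs with
    | nil =>
      obtain ⟨b, items⟩ := r
      intro x hx
      simp [appendLastRun] at hx
      subst hx; simp
    | cons r' rs' =>
      intro x hx
      simp only [appendLastRun] at hx
      rcases List.mem_cons.mp hx with h | h
      · exact hg x (h ▸ List.mem_cons_self)
      · exact ih (fun y hy => hg y (List.mem_cons_of_mem _ hy)) x h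

lemma appendLastRun_render (runs : List (Bool × List (List Char))) (it : List Char)
    (hne : runs ≠ []) (hg : Good runs) :
    renderAll (appendLastRun runs it) = renderAll runs ++ ',' :: it ∧
    appendLastRun runs it ≠ [] := by
  induction runs with
  | nil => exact absurd rfl hne
  | cons r rs ih =>
    cases rs with
    | nil =>
      obtain ⟨b, items⟩ := r
      have hitems : items ≠ [] := hg (b, items) List.mem_cons_self
      refine ⟨?_, by simp [appendLastRun]⟩
      simp only [appendLastRun, renderAll, List.map_cons, List.map_nil,
        PySem.Chars.join_singleton, renderRun]
      rw [join_comma_concat items it hitems]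
      simp
    | cons r' rs' =>
      have hih := ih (by simp) (fun y hy => hg y (List.mem_cons_of_mem _ hy))
      refine ⟨?_, by simp [appendLastRun]⟩
      simp only [appendLastRun, renderAll_cons, hih.1]
      simp

lemma rstrip_comma (body : List Char) (h : body.getLast? ≠ some ',') :
    ((body ++ [',']).reverse.dropWhile (fun c => c == ',')).reverse = body := by
  rw [List.reverse_append]
  simp only [List.reverse_cons, List.reverse_nil, List.nil_append, List.singleton_append,
    List.dropWhile_cons]
  norm_num
  have hdrop : body.reverse.dropWhile (fun c => c == ',') = body.reverse := by
    cases hb : body.reverse with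
    | nil => rfl
    | cons c rest =>
      have hc : body.getLast? = some c := by
        rw [← List.head?_reverse, hb]; rfl
      have : (c == ',') = false := by
        by_contra hcc
        have : c = ',' := by
          cases hcc' : (c == ',') with
          | true => exact beq_iff_eq.mp hcc'
          | false => exact absurd hcc' hcc
        exact h (hc.trans (by rw [this]))
      simp [this]
  rw [hdrop, List.reverse_reverse]

-- the induction invariant: A's string state is B's rendered runs plus one trailing comma
lemma loop_inv (data : List (List Int)) :
    ∀ (temp : List Char) (runs : List (Bool × List (List Char))) (tl : Int),
    Good runs → RelAB temp runs →
    Good (data.foldl stepB (runs, tl)).1 ∧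
    RelAB (data.foldl stepA (temp, tl)).1 (data.foldl stepB (runs, tl)).1 ∧
    (data.foldl stepA (temp, tl)).2 = (data.foldl stepB (runs, tl)).2 := by
  induction data with
  | nil => intro temp runs tl hg hr; exact ⟨hg, hr, rfl⟩
  | cons d rest ih =>
    intro temp runs tl hg hr
    simp only [List.foldl_cons]
    by_cases h1 : d.length = 1
    · -- singleton: A appends split[0]+'),', B appends fmtItem d to the current run
      have hA : stepA (temp, tl) d = (temp ++ (fmtItem d ++ [',']), tl) := by
        simp [stepA, fmtItem, h1]

      rcases hr with ⟨hrn, hte⟩ | ⟨hrn, hte, hlc⟩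
      · -- runs empty
        have hB : stepB (runs, tl) d = (runs ++ [(false, [fmtItem d])], tl) := by
          simp [stepB, h1, hrn]
        rw [hA, hB, hrn, hte]
        apply ih
        · intro r hrr; simp at hrr; subst hrr; simp
        · right
          refine ⟨by simp, ?_, ?_⟩
          · simp [renderAll, renderRun, PySem.Chars.join_singleton]
          · simp only [renderAll, List.nil_append, List.map_cons, List.map_nil,
              PySem.Chars.join_singleton, renderRun]
            simp [fmtItem_last d]
      · -- runs nonempty
        have hB : stepB (runs, tl) d = (appendLastRun runs (fmtItem d), tl) := by
          simp [stepB, h1, hrn]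
        rw [hA, hB, hte]
        have hal := appendLastRun_render runs (fmtItem d) hrn hg
        apply ih
        · exact appendLastRun_good runs _ hg
        · right
          refine ⟨hal.2, ?_, ?_⟩
          · rw [hal.1]; simp
          · rw [hal.1, List.getLast?_append_of_ne_nil _ (by simp)]
            rw [show ',' :: fmtItem d = [','] ++ fmtItem d from rfl,
              List.getLast?_append_of_ne_nil _ (fmtItem_ne_nil d), fmtItem_last d]
            simp
    · by_cases h2 : (d.length : Int) = tl
      · -- len d == temp_len: plain append in both
        have hA : stepA (temp, tl) d = (temp ++ (fmtItem d ++ [',']), tl) := by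
          simp only [stepA, fmtItem, PySem.List.len_eq, h2]
          split_ifs <;> simp

        rcases hr with ⟨hrn, hte⟩ | ⟨hrn, hte, hlc⟩
        · have hB : stepB (runs, tl) d = (runs ++ [(false, [fmtItem d])], tl) := by
            simp [stepB, h2, hrn]
          rw [hA, hB, hrn, hte]
          apply ih
          · intro r hrr; simp at hrr; subst hrr; simp
          · right
            refine ⟨by simp, ?_, ?_⟩
            · simp [renderAll, renderRun, PySem.Chars.join_singleton]
            · simp only [renderAll, List.nil_append, List.map_cons, List.map_nil,
                PySem.Chars.join_singleton, renderRun]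
              simp [fmtItem_last d]
        · have hB : stepB (runs, tl) d = (appendLastRun runs (fmtItem d), tl) := by
            simp [stepB, h2, hrn]
          rw [hA, hB, hte]
          have hal := appendLastRun_render runs (fmtItem d) hrn hg
          apply ih
          · exact appendLastRun_good runs _ hg
          · right
            refine ⟨hal.2, ?_, ?_⟩
            · rw [hal.1]; simp
            · rw [hal.1, List.getLast?_append_of_ne_nil _ (by simp)]
              rw [show ',' :: fmtItem d = [','] ++ fmtItem d from rfl,
                List.getLast?_append_of_ne_nil _ (fmtItem_ne_nil d), fmtItem_last d]
              simp
      · -- new run: A deletes the trailing comma and inserts '\n\n'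
        have hfi : fmtItem d = pyTupleRepr d := by simp [fmtItem, PySem.List.len_eq, h1]
        have hA : stepA (temp, tl) d =
            (temp.dropLast ++ ('\n' :: '\n' :: (pyTupleRepr d ++ [','])), PySem.List.len d) := by
          simp [stepA, h1, h2, PySem.List.slice_to_neg_one]
        have hB : stepB (runs, tl) d = (runs ++ [(true, [fmtItem d])], PySem.List.len d) := by
          simp [stepB, h1, h2]
        rw [hA, hB]
        have hrender : renderAll (runs ++ [(true, [fmtItem d])]) =
            renderAll runs ++ ('\n' :: '\n' :: fmtItem d) := by
          rw [renderAll_append]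
          simp [renderRun, PySem.Chars.join_singleton]
        have hgood : Good (runs ++ [(true, [fmtItem d])]) := by
          intro r hrr
          rcases List.mem_append.mp hrr with h | h
          · exact hg r h
          · simp at h; subst h; simp
        have hlast : (renderAll (runs ++ [(true, [fmtItem d])])).getLast? ≠ some ',' := by
          rw [hrender, List.getLast?_append_of_ne_nil _ (by simp)]
          rw [show '\n' :: '\n' :: fmtItem d = ['\n', '\n'] ++ fmtItem d from rfl,
            List.getLast?_append_of_ne_nil _ (fmtItem_ne_nil d), fmtItem_last d]
          simp
        rcases hr with ⟨hrn, hte⟩ | ⟨hrn, hte, hlc⟩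
        · rw [hte]
          apply ih _ _ _ hgood
          right
          refine ⟨by simp, ?_, hlast⟩
          rw [hrender, hrn]
          simp [renderAll, hfi]
        · rw [hte, List.dropLast_concat]
          apply ih _ _ _ hgood
          right
          refine ⟨by simp, ?_, hlast⟩
          rw [hrender, hfi]
          simp

-- ===== VERDICT (by name: the statement is the Claim_ definition above) =====
theorem export_output_spec : Claim_equal_export_output := by
  intro data _
  unfold Spec_export_output export_output export_output_alt
  have h := loop_inv data [] [] 1 (by intro r hr; simp at hr) (Or.inl ⟨rfl, rfl⟩)
  rcases h.2.1 with ⟨hrn, hte⟩ | ⟨hrn, hte, hlc⟩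
  · simp only [hte, hrn]
    rfl
  · simp only [hte]
    rw [rstrip_comma _ hlc]
    rfl
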